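-- pv_equiv track=rewrite | github.com/L1ZGitHub/DD2417-Assignment2 | RandomIndexing/experiments.py | build_datapoints
-- ===== SOURCE A (Python) =====
-- def get_context(tokens, i, lws, rws, pad):
--     if i < lws:
--         left = [pad] * (lws - i) + tokens[0:i]
--     else:
--         left = tokens[i - lws:i]
--     if i + rws >= len(tokens):
--         right = tokens[i + 1:] + [pad] * (rws - (len(tokens) - i - 1))
--     else:
--         right = tokens[i + 1:i + 1 + rws]
--     return left + right
--
-- def build_datapoints(tokens, word2id, lws, rws, pad):
--     datapoints = []
--     for i, tok in enumerate(tokens):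
--         focus_id = word2id[tok]
--         context = get_context(tokens, i, lws, rws, pad)
--         context_ids = [word2id[w] for w in context]
--         datapoints.append((focus_id, context_ids))
--     return datapoints
-- ===== SOURCE B (Python) =====
-- def build_datapoints(tokens, word2id, lws, rws, pad):
--     ids = [word2id[t] for t in tokens]
--     pid = word2id.get(pad)
--     padded = [pid] * lws + ids + [pid] * rws
--     return [(fid, padded[i:i + lws] + padded[i + lws + 1:i + lws + 1 + rws])
--             for i, fid in enumerate(ids)]
-- ===== Notes on version B (the rewrite author's own statement) =====
-- stated objective: simpler
-- what changed: Instead of per-index boundary case analysis (get_context with four branches) over raw tokens followed by per-context-word dict lookups, B maps all tokens to ids once, builds a single pre-padded id array [pid]*lws + ids + [pid]*rws, and emits each context by two uniform slices of that array.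
-- outside the precondition, e.g. on build_datapoints(['x'], {'x': 1}, -1, 1, 'x'): A returns [(1, [1])], B returns [(1, [1, 1])]
import Mathlib
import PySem

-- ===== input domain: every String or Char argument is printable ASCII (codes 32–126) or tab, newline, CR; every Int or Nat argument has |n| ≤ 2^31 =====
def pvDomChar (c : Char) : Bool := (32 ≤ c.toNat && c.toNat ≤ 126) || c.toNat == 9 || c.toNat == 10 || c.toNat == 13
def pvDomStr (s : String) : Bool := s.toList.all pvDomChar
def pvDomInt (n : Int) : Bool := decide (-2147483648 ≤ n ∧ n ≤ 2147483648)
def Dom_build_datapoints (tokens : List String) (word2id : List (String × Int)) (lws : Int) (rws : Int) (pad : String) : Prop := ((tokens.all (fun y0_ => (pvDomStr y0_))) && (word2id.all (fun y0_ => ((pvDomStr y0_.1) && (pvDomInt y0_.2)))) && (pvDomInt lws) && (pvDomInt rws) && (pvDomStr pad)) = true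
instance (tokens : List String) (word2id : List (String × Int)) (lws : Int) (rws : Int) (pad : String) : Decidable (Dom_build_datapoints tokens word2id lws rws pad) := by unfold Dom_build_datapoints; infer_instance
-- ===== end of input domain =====

-- B replaces A's four-branch boundary analysis (get_context) and per-context-word dict lookups
-- with a single token→id pass and uniform slicing of one pre-padded id array (objective: simpler).

-- ===== PORT A =====
-- dict lookup word2id[w]; KeyError (missing key) is excluded by Pre_, the default 0 is never relied on there
def pvLook (word2id : List (String × Int)) (w : String) : Int := (word2id.lookup w).getD 0

def pvGetContext (tokens : List String) (i : Int) (lws : Int) (rws : Int) (pad : String) : List String :=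
  let left := if i < lws then
      List.replicate (lws - i).toNat pad ++ PySem.List.slice tokens (some 0) (some i)
    else PySem.List.slice tokens (some (i - lws)) (some i)
  let right := if (tokens.length : Int) ≤ i + rws then
      PySem.List.slice tokens (some (i + 1)) none ++ List.replicate (rws - ((tokens.length : Int) - i - 1)).toNat pad
    else PySem.List.slice tokens (some (i + 1)) (some (i + 1 + rws))
  left ++ right

def build_datapoints (tokens : List String) (word2id : List (String × Int)) (lws : Int) (rws : Int) (pad : String) : List (Int × List Int) :=
  (PySem.List.enumerate tokens 0).foldl (fun datapoints p =>
    let focus_id := pvLook word2id p.2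
    let context := pvGetContext tokens p.1 lws rws pad
    let context_ids := context.map (fun w => pvLook word2id w)
    datapoints ++ [(focus_id, context_ids)]) []

-- ===== PORT B =====
def build_datapoints_alt (tokens : List String) (word2id : List (String × Int)) (lws : Int) (rws : Int) (pad : String) : List (Int × List Int) :=
  let ids := tokens.map (fun t => pvLook word2id t)
  let pid := pvLook word2id pad
  let padded := List.replicate lws.toNat pid ++ ids ++ List.replicate rws.toNat pid
  (PySem.List.enumerate ids 0).map (fun p =>
    (p.2, PySem.List.slice padded (some p.1) (some (p.1 + lws)) ++
          PySem.List.slice padded (some (p.1 + lws + 1)) (some (p.1 + lws + 1 + rws))))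

-- ===== PRECONDITION & SPEC =====
-- Pre_ excludes (a) inputs where Python A raises KeyError: a token absent from word2id, or pad absent
-- while padding is actually used (tokens nonempty and a positive window side); and (b) negative window
-- sizes lws/rws, outside the function's natural domain, where A returns values shaped by Python's
-- negative-slice wraparound in tokens[i+1:i+1+rws].
def Pre_build_datapoints (tokens : List String) (word2id : List (String × Int)) (lws : Int) (rws : Int) (pad : String) : Prop :=
  0 ≤ lws ∧ 0 ≤ rws ∧ (∀ t ∈ tokens, (word2id.lookup t).isSome = true) ∧
  (tokens ≠ [] → (0 < lws ∨ 0 < rws) → (word2id.lookup pad).isSome = true)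
instance (tokens : List String) (word2id : List (String × Int)) (lws : Int) (rws : Int) (pad : String) : Decidable (Pre_build_datapoints tokens word2id lws rws pad) := by unfold Pre_build_datapoints; infer_instance

def pvWitness_build_datapoints : List String × (List (String × Int)) × Int × Int × String :=
  (["a", "b"], [("a", 1), ("b", 2), ("p", 0)], 1, 2, "p")

def Spec_build_datapoints (tokens : List String) (word2id : List (String × Int)) (lws : Int) (rws : Int) (pad : String) (out : List (Int × List Int)) : Prop := out = build_datapoints_alt tokens word2id lws rws pad
instance (tokens : List String) (word2id : List (String × Int)) (lws : Int) (rws : Int) (pad : String) (out : List (Int × List Int)) : Decidable (Spec_build_datapoints tokens word2id lws rws pad out) := by unfold Spec_build_datapoints; infer_instance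

-- ===== CLAIM (what is proved, stated in full; the proofs are below) =====
def Claim_equal_build_datapoints : Prop := ∀ (tokens : List String) (word2id : List (String × Int)) (lws : Int) (rws : Int) (pad : String), Dom_build_datapoints tokens word2id lws rws pad → Pre_build_datapoints tokens word2id lws rws pad → Spec_build_datapoints tokens word2id lws rws pad (build_datapoints tokens word2id lws rws pad)

-- ===== LEMMAS AND PROOFS =====

-- the mapped context of A equals B's two slices of the pre-padded id array
lemma pv_ctx_eq (tokens : List String) (f : String → Int) (pad : String) (L R k : Nat)
    (hk : k < tokens.length) :
    (pvGetContext tokens (k : Int) (L : Int) (R : Int) pad).map f =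
      PySem.List.slice (List.replicate L (f pad) ++ tokens.map f ++ List.replicate R (f pad))
        (some (k : Int)) (some ((k : Int) + (L : Int))) ++
      PySem.List.slice (List.replicate L (f pad) ++ tokens.map f ++ List.replicate R (f pad))
        (some ((k : Int) + (L : Int) + 1)) (some ((k : Int) + (L : Int) + 1 + (R : Int))) := by
  have e1 : ((k : Int) + (L : Int)) = ((k + L : Nat) : Int) := by push_cast; ring
  have e2 : (((k + L : Nat) : Int) + 1) = ((k + L + 1 : Nat) : Int) := by push_cast; ring
  have e3 : (((k + L + 1 : Nat) : Int) + (R : Int)) = ((k + L + 1 + R : Nat) : Int) := by push_cast; ring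
  rw [e1, e2, e3, PySem.List.slice_natCast, PySem.List.slice_natCast]
  have s1 : k + L - k = L := by omega
  have s2 : k + L + 1 + R - (k + L + 1) = R := by omega
  rw [s1, s2]
  unfold pvGetContext
  by_cases hL : k < L
  · rw [if_pos (by exact_mod_cast hL)]
    have t1 : ((L : Int) - (k : Int)).toNat = L - k := by omega
    rw [t1, PySem.List.slice_zero_start, PySem.List.slice_to_natCast]
    by_cases hR : tokens.length ≤ k + R
    · rw [if_pos (by exact_mod_cast hR)]
      have e4 : ((k : Int) + 1) = ((k + 1 : Nat) : Int) := by push_cast; ring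
      have t2 : ((R : Int) - ((tokens.length : Int) - (k : Int) - 1)).toNat = k + 1 + R - tokens.length := by omega
      rw [e4, t2, PySem.List.slice_from_natCast]
      simp only [List.map_append, List.map_replicate, List.map_take, List.map_drop,
        List.drop_append, List.take_append, List.drop_replicate, List.take_replicate,
        List.length_replicate, List.length_map, List.length_append, List.length_drop]
      rw [show k - L = 0 from by omega, show L - (L - k) = k from by omega,
        show min L (L - k) = L - k from by omega,
        show min (L - (L - k + (tokens.length - 0))) (R - (k - (L + tokens.length))) = 0 from by omega,
        show min R (L - (k + L + 1)) = 0 from by omega,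
        show R - (L - (k + L + 1)) = R from by omega, show k + L + 1 - L = k + 1 from by omega,
        show min (R - (L - (k + L + 1) + (tokens.length - (k + 1)))) (R - (k + L + 1 - (L + tokens.length))) = k + 1 + R - tokens.length from by omega,
        show List.take R (List.drop (k + 1) (List.map f tokens)) = List.drop (k + 1) (List.map f tokens) from List.take_of_length_le (by simp; omega)]
      simp
    · rw [if_neg (by simp; omega)]
      have e4 : ((k : Int) + 1) = ((k + 1 : Nat) : Int) := by push_cast; ring
      have e5 : (((k + 1 : Nat) : Int) + (R : Int)) = ((k + 1 + R : Nat) : Int) := by push_cast; ring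
      rw [e4, e5, PySem.List.slice_natCast]
      simp only [List.map_append, List.map_replicate, List.map_take, List.map_drop,
        List.drop_append, List.take_append, List.drop_replicate, List.take_replicate,
        List.length_replicate, List.length_map, List.length_append, List.length_drop]
      rw [show k + 1 + R - (k + 1) = R from by omega, show k - L = 0 from by omega,
        show min L (L - k) = L - k from by omega, show L - (L - k) = k from by omega,
        show min (L - (L - k + (tokens.length - 0))) (R - (k - (L + tokens.length))) = 0 from by omega,
        show min R (L - (k + L + 1)) = 0 from by omega,
        show R - (L - (k + L + 1)) = R from by omega, show k + L + 1 - L = k + 1 from by omega,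
        show min (R - (L - (k + L + 1) + (tokens.length - (k + 1)))) (R - (k + L + 1 - (L + tokens.length))) = 0 from by omega]
      simp
  · rw [if_neg (by simp; omega)]
    have t1 : ((k : Int) - (L : Int)) = ((k - L : Nat) : Int) := by omega
    rw [t1, PySem.List.slice_natCast]
    by_cases hR : tokens.length ≤ k + R
    · rw [if_pos (by exact_mod_cast hR)]
      have e4 : ((k : Int) + 1) = ((k + 1 : Nat) : Int) := by push_cast; ring
      have t2 : ((R : Int) - ((tokens.length : Int) - (k : Int) - 1)).toNat = k + 1 + R - tokens.length := by omega
      rw [e4, t2, PySem.List.slice_from_natCast]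
      simp only [List.map_append, List.map_replicate, List.map_take, List.map_drop,
        List.drop_append, List.take_append, List.drop_replicate, List.take_replicate,
        List.length_replicate, List.length_map, List.length_append, List.length_drop]
      rw [show k - (k - L) = L from by omega, show min L (L - k) = 0 from by omega,
        show L - (L - k) = L from by omega,
        show min (L - (L - k + (tokens.length - (k - L)))) (R - (k - (L + tokens.length))) = 0 from by omega,
        show min R (L - (k + L + 1)) = 0 from by omega,
        show R - (L - (k + L + 1)) = R from by omega, show k + L + 1 - L = k + 1 from by omega,
        show min (R - (L - (k + L + 1) + (tokens.length - (k + 1)))) (R - (k + L + 1 - (L + tokens.length))) = k + 1 + R - tokens.length from by omega,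
        show List.take R (List.drop (k + 1) (List.map f tokens)) = List.drop (k + 1) (List.map f tokens) from List.take_of_length_le (by simp; omega)]
      simp
    · rw [if_neg (by simp; omega)]
      have e4 : ((k : Int) + 1) = ((k + 1 : Nat) : Int) := by push_cast; ring
      have e5 : (((k + 1 : Nat) : Int) + (R : Int)) = ((k + 1 + R : Nat) : Int) := by push_cast; ring
      rw [e4, e5, PySem.List.slice_natCast]
      simp only [List.map_append, List.map_take, List.map_drop,
        List.drop_append, List.take_append, List.drop_replicate, List.take_replicate,
        List.length_replicate, List.length_map, List.length_append, List.length_drop]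
      rw [show k - (k - L) = L from by omega, show k + 1 + R - (k + 1) = R from by omega,
        show min L (L - k) = 0 from by omega, show L - (L - k) = L from by omega,
        show min (L - (L - k + (tokens.length - (k - L)))) (R - (k - (L + tokens.length))) = 0 from by omega,
        show min R (L - (k + L + 1)) = 0 from by omega,
        show R - (L - (k + L + 1)) = R from by omega, show k + L + 1 - L = k + 1 from by omega,
        show min (R - (L - (k + L + 1) + (tokens.length - (k + 1)))) (R - (k + L + 1 - (L + tokens.length))) = 0 from by omega]
      simp

theorem build_datapoints_spec : Claim_equal_build_datapoints := by
  intro tokens word2id lws rws pad _hDom hPre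
  obtain ⟨hl, hr, -, -⟩ := hPre
  obtain ⟨L, rfl⟩ := Int.eq_ofNat_of_zero_le hl
  obtain ⟨R, rfl⟩ := Int.eq_ofNat_of_zero_le hr
  unfold Spec_build_datapoints build_datapoints build_datapoints_alt
  rw [PySem.List.foldl_append_singleton_eq_map]
  apply List.ext_getElem
  · simp [PySem.List.length_enumerate]
  · intro k h1 h2
    have hk : k < tokens.length := by
      simpa [PySem.List.length_enumerate] using h1
    simp only [List.nil_append, List.getElem_map, PySem.List.getElem_enumerate,
      Int.toNat_natCast, zero_add]
    refine Prod.ext ?_ ?_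
    · simp
    · simp only []
      exact pv_ctx_eq tokens (pvLook word2id) pad L R k hk
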